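-- pv_equiv track=rewrite | github.com/Haukecodes/creditDashboardProject | dashboardPrototype.py | cedentDictionary
-- ===== SOURCE A (Python) =====
-- def cedentDictionary(values):
--     options = []
--     repeats = []
--
--     for elements in values:
--         if elements in repeats:
--             continue
--
--         options.append({'label': str(elements), 'value': str(elements)})
--         repeats.append(elements)
--
--     return options
-- ===== SOURCE B (Python) =====
-- def cedentDictionary(values):
--     out = []
--     for i in range(len(values) - 1, -1, -1):
--         x = values[i]
--         if x not in values[:i]:
--             out.append({'label': str(x), 'value': str(x)})
--     out.reverse()
--     return out
-- ===== Notes on version B (the rewrite author's own statement) =====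
-- stated objective: alternative
-- what changed: Instead of a forward pass with a growing seen-list, B walks the indices backwards, keeps values[i] only if it has no earlier occurrence in the input's own prefix values[:i] (no auxiliary accumulator), collects the dicts back-to-front and reverses at the end.
import Mathlib
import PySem

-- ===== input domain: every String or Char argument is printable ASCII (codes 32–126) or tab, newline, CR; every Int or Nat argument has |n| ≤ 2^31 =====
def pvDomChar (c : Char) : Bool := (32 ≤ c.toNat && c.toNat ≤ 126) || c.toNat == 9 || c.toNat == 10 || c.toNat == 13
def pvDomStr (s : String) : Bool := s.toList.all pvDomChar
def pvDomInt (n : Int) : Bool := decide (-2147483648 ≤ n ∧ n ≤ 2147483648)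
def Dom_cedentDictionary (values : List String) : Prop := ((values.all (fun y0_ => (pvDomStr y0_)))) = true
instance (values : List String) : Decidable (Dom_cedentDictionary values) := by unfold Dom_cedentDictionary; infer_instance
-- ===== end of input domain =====

-- B replaces A's forward seen-list pass by a backwards index walk that keeps values[i]
-- iff it does not occur in the prefix values[:i], then reverses; alternative, same cost.

-- the option dict {'label': str(e), 'value': str(e)} both programs build (str on a string is the string)
def pvFmt (e : String) : List (String × String) := [("label", e), ("value", e)]

-- ===== PORT A =====
-- options/repeats accumulators of A's forward loop
def cedentDictionary (values : List String) : List (List (String × String)) :=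
  (values.foldl
    (fun (st : List (List (String × String)) × List String) elements =>
      if st.2.contains elements then st
      else (st.1 ++ [pvFmt elements], st.2 ++ [elements]))
    ([], [])).1

-- ===== PORT B =====
-- for i in range(len(values)-1, -1, -1): x = values[i]; if x not in values[:i]: out.append(...); out.reverse()
def cedentDictionary_alt (values : List String) : List (List (String × String)) :=
  ((PySem.List.pyRange ((values.length : Int) - 1) (-1) (-1)).foldl
    (fun out i =>
      let x := PySem.List.pyGetD values i ""
      if !(PySem.List.slice values (some 0) (some i)).contains x then
        out ++ [pvFmt x]
      else out)
    []).reverse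

-- ===== PRECONDITION & SPEC =====
def Spec_cedentDictionary (values : List String) (out : List (List (String × String))) : Prop := out = cedentDictionary_alt values
instance (values : List String) (out : List (List (String × String))) : Decidable (Spec_cedentDictionary values out) := by unfold Spec_cedentDictionary; infer_instance

-- ===== CLAIM (what is proved, stated in full; the proofs are below) =====
def Claim_equal_cedentDictionary : Prop := ∀ (values : List String), Dom_cedentDictionary values → Spec_cedentDictionary values (cedentDictionary values)

-- ===== LEMMAS AND PROOFS =====

-- A-side invariant: along A's fold, options is the image of repeats under pvFmt and
-- repeats evolves exactly like PySem.Set.ofList's fold.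
theorem cedentDictionary_invariant (values reps : List String) :
    values.foldl
      (fun (st : List (List (String × String)) × List String) elements =>
        if st.2.contains elements then st
        else (st.1 ++ [pvFmt elements], st.2 ++ [elements]))
      (reps.map pvFmt, reps)
    = ((values.foldl PySem.Set.add reps).map pvFmt, values.foldl PySem.Set.add reps) := by
  induction values generalizing reps with
  | nil => rfl
  | cons x xs ih =>
      simp only [List.foldl_cons, PySem.Set.add, PySem.Set.contains]
      by_cases h : reps.contains x
      · simp only [if_pos h]; exact ih reps
      · simp only [Bool.not_eq_true] at h
        simp only [h, Bool.false_eq_true, if_false]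
        simpa using ih (reps ++ [x])

-- A on an appended element: kept iff not already present
theorem cedentDictionary_append (ys : List String) (x : String) :
    cedentDictionary (ys ++ [x])
      = cedentDictionary ys ++ (if ys.contains x then [] else [pvFmt x]) := by
  have h0 := cedentDictionary_invariant ys []
  simp only [List.map_nil] at h0
  simp only [cedentDictionary, List.foldl_append, h0, List.foldl_cons, List.foldl_nil]
  by_cases h : x ∈ ys
  · simp [← PySem.Set.ofList_eq_foldl, PySem.Set.mem_ofList, h]
  · simp [← PySem.Set.ofList_eq_foldl, PySem.Set.mem_ofList, h]

-- B-side: the raw (unreversed) loop output over the appended input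
theorem alt_raw_append (ys : List String) (x : String) :
    ((PySem.List.pyRange (((ys ++ [x]).length : Int) - 1) (-1) (-1)).foldl
      (fun out i =>
        if !(PySem.List.slice (ys ++ [x]) (some 0) (some i)).contains
            (PySem.List.pyGetD (ys ++ [x]) i "") then
          out ++ [pvFmt (PySem.List.pyGetD (ys ++ [x]) i "")]
        else out)
      [])
    = (if ys.contains x then [] else [pvFmt x]) ++
      ((PySem.List.pyRange ((ys.length : Int) - 1) (-1) (-1)).foldl
        (fun out i =>
          if !(PySem.List.slice ys (some 0) (some i)).contains
              (PySem.List.pyGetD ys i "") then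
            out ++ [pvFmt (PySem.List.pyGetD ys i "")]
          else out)
        []) := by
  have hlen : (((ys ++ [x]).length : Int) - 1) = (ys.length : Int) := by
    simp
  have hcons : PySem.List.pyRange ((ys.length : Int)) (-1) (-1)
      = (ys.length : Int) :: PySem.List.pyRange ((ys.length : Int) - 1) (-1) (-1) :=
    PySem.List.pyRange_neg_one_cons (by omega)
  have he : PySem.List.pyGetD (ys ++ [x]) ((ys.length : Int)) "" = x := by
    simp [PySem.List.pyGetD_natCast, List.getD]
  have hs : PySem.List.slice (ys ++ [x]) (some 0) (some ((ys.length : Int))) = ys := by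
    simp [PySem.List.slice_to_natCast]
  rw [hlen, hcons]
  simp only [List.foldl_cons, he, hs, List.nil_append]
  have hcongr : ∀ (acc : List (List (String × String))) (i : Int),
      i ∈ PySem.List.pyRange ((ys.length : Int) - 1) (-1) (-1) →
      (if !(PySem.List.slice (ys ++ [x]) (some 0) (some i)).contains
            (PySem.List.pyGetD (ys ++ [x]) i "") then
          acc ++ [pvFmt (PySem.List.pyGetD (ys ++ [x]) i "")]
        else acc)
      = (if !(PySem.List.slice ys (some 0) (some i)).contains
            (PySem.List.pyGetD ys i "") then
          acc ++ [pvFmt (PySem.List.pyGetD ys i "")]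
        else acc) := by
    intro acc i hi
    rw [PySem.List.mem_pyRange_neg_one] at hi
    obtain ⟨h1, h2⟩ := hi
    obtain ⟨k, rfl⟩ := Int.eq_ofNat_of_zero_le (by omega : (0:Int) ≤ i)
    have hk : k < ys.length := by exact_mod_cast (by omega : (k : Int) < (ys.length : Int))
    have hg : PySem.List.pyGetD (ys ++ [x]) ((k : Nat) : Int) ""
        = PySem.List.pyGetD ys ((k : Nat) : Int) "" := by
      simp [PySem.List.pyGetD_natCast, List.getD, List.getElem?_append_left hk]
    have hsl : PySem.List.slice (ys ++ [x]) (some 0) (some ((k : Nat) : Int))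
        = PySem.List.slice ys (some 0) (some ((k : Nat) : Int)) := by
      simp [PySem.List.slice_to_natCast, List.take_append_of_le_length (le_of_lt hk)]
    rw [hg, hsl]
  have heq : List.foldl
      (fun out i =>
        if !(PySem.List.slice (ys ++ [x]) (some 0) (some i)).contains
            (PySem.List.pyGetD (ys ++ [x]) i "") then
          out ++ [pvFmt (PySem.List.pyGetD (ys ++ [x]) i "")]
        else out)
      (if !ys.contains x then [pvFmt x] else [])
      (PySem.List.pyRange ((ys.length : Int) - 1) (-1) (-1))
    = List.foldl
      (fun out i =>
        if !(PySem.List.slice ys (some 0) (some i)).contains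
            (PySem.List.pyGetD ys i "") then
          out ++ [pvFmt (PySem.List.pyGetD ys i "")]
        else out)
      (if !ys.contains x then [pvFmt x] else [])
      (PySem.List.pyRange ((ys.length : Int) - 1) (-1) (-1)) :=
    PySem.List.foldl_congr_mem _ _ _ _ hcongr
  rw [heq]
  rw [PySem.List.foldl_append_if
      (p := fun i => !(PySem.List.slice ys (some 0) (some i)).contains
        (PySem.List.pyGetD ys i ""))
      (f := fun i => pvFmt (PySem.List.pyGetD ys i "")),
    PySem.List.foldl_append_if
      (p := fun i => !(PySem.List.slice ys (some 0) (some i)).contains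
        (PySem.List.pyGetD ys i ""))
      (f := fun i => pvFmt (PySem.List.pyGetD ys i ""))]
  by_cases h : x ∈ ys
  · simp [h]
  · simp [h]

-- B on an appended element: same kept-element rule, appended after the prefix's output
theorem cedentDictionary_alt_append (ys : List String) (x : String) :
    cedentDictionary_alt (ys ++ [x])
      = cedentDictionary_alt ys ++ (if ys.contains x then [] else [pvFmt x]) := by
  simp only [cedentDictionary_alt]
  rw [alt_raw_append, List.reverse_append]
  by_cases h : x ∈ ys
  · simp [h]
  · simp [h]

theorem cedentDictionary_eq (values : List String) :
    cedentDictionary values = cedentDictionary_alt values := by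
  induction values using List.reverseRecOn with
  | nil => rfl
  | append_singleton ys x ih =>
    rw [cedentDictionary_append, cedentDictionary_alt_append, ih]

-- ===== VERDICT (by name: the statement is the Claim_ definition above) =====
theorem cedentDictionary_spec : Claim_equal_cedentDictionary := by
  intro values _
  exact cedentDictionary_eq values
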